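-- pv_equiv track=rewrite | github.com/jblacketter/tagteam | tagteam/parser.py | _content_summary
-- ===== SOURCE A (Python) =====
-- def _content_summary(content: str) -> str | None:
--     """Extract a summary from JSONL round content (first substantive line)."""
--     if not content:
--         return None
--     for line in content.split("\n"):
--         stripped = line.strip()
--         if not stripped:
--             continue
--         if stripped.startswith("**"):
--             continue
--         if stripped.startswith("#"):
--             continue
--         if stripped.startswith("-"):
--             continue
--         return stripped
--     # Fall back to first non-empty line
--     for line in content.split("\n"):
--         stripped = line.strip()
--         if stripped:
--             return stripped
--     return None
-- ===== SOURCE B (Python) =====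
-- def _content_summary(content: str) -> str | None:
--     """One pass: remember the first non-empty line as fallback while scanning."""
--     if not content:
--         return None
--     fallback = None
--     for line in content.split("\n"):
--         stripped = line.strip()
--         if not stripped:
--             continue
--         if fallback is None:
--             fallback = stripped
--         if not (stripped.startswith("**") or stripped.startswith("#") or stripped.startswith("-")):
--             return stripped
--     return fallback
-- ===== Notes on version B (the rewrite author's own statement) =====
-- stated objective: simpler
-- what changed: Merged A's two scans over the split lines into a single pass that records the first non-empty line as a fallback while looking for the first non-marker line.
import Mathlib
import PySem

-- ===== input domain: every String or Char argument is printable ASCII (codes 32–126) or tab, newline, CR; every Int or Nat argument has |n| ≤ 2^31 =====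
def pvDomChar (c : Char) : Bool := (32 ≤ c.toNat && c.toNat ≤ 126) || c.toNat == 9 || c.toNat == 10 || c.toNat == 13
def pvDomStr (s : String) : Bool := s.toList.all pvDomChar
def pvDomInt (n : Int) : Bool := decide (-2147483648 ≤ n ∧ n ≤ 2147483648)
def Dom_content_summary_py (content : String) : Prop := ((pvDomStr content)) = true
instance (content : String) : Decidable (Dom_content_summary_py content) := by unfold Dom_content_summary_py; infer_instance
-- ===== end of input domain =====

-- B merges A's two scans into one pass that records the first non-empty line as a fallback (objective: simpler).

-- shared by both ports: content.split("\n") (both Pythons compute the same split)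
def pvSplitNL (s : String) : List String := (PySem.Chars.splitOn s.toList ['\n']).map String.ofList

-- ===== PORT A =====
-- first loop of A: first non-empty line not starting with '**', '#' or '-'
def pvALoop1 : List String → Option String
  | [] => none
  | l :: ls =>
    let stripped := PySem.Str.strip l
    if stripped = "" then pvALoop1 ls
    else if PySem.Str.startswith stripped "**" then pvALoop1 ls
    else if PySem.Str.startswith stripped "#" then pvALoop1 ls
    else if PySem.Str.startswith stripped "-" then pvALoop1 ls
    else some stripped

-- second loop of A: first non-empty line
def pvALoop2 : List String → Option String
  | [] => none
  | l :: ls =>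
    let stripped := PySem.Str.strip l
    if stripped ≠ "" then some stripped else pvALoop2 ls

def content_summary_py (content : String) : Option String :=
  if content = "" then none
  else
    match pvALoop1 (pvSplitNL content) with
    | some s => some s
    | none => pvALoop2 (pvSplitNL content)

-- ===== PORT B =====
-- single pass carrying the fallback (first non-empty stripped line seen so far)
def pvBLoop : List String → Option String → Option String
  | [], fallback => fallback
  | l :: ls, fallback =>
    let stripped := PySem.Str.strip l
    if stripped = "" then pvBLoop ls fallback
    else
      let fallback' := match fallback with | none => some stripped | some f => some f
      if !(PySem.Str.startswith stripped "**" || PySem.Str.startswith stripped "#"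
            || PySem.Str.startswith stripped "-") then some stripped
      else pvBLoop ls fallback'

def content_summary_py_alt (content : String) : Option String :=
  if content = "" then none
  else pvBLoop (pvSplitNL content) none

-- ===== PRECONDITION & SPEC =====
def Spec_content_summary_py (content : String) (out : Option String) : Prop := out = content_summary_py_alt content
instance (content : String) (out : Option String) : Decidable (Spec_content_summary_py content out) := by unfold Spec_content_summary_py; infer_instance

-- ===== CLAIM (what is proved, stated in full; the proofs are below) =====
def Claim_equal_content_summary_py : Prop := ∀ (content : String), Dom_content_summary_py content → Spec_content_summary_py content (content_summary_py content)

-- ===== LEMMAS AND PROOFS =====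
-- B's single pass equals A's first loop, falling back to the carried value, then to A's second loop.
theorem pvBLoop_eq (ls : List String) (fb : Option String) :
    pvBLoop ls fb =
      match pvALoop1 ls with
      | some s => some s
      | none => match fb with | some f => some f | none => pvALoop2 ls := by
  induction ls generalizing fb with
  | nil => cases fb <;> simp [pvBLoop, pvALoop1, pvALoop2]
  | cons l ls ih =>
    simp only [pvBLoop, pvALoop1, pvALoop2]
    by_cases h0 : PySem.Str.strip l = ""
    · simp [h0, ih]
    · by_cases h1 : PySem.Chars.startswith (PySem.Chars.strip l.toList) ['*', '*'] = true <;>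
      by_cases h2 : PySem.Chars.startswith (PySem.Chars.strip l.toList) ['#'] = true <;>
      by_cases h3 : PySem.Chars.startswith (PySem.Chars.strip l.toList) ['-'] = true <;>
      cases fb <;> simp [h0, h1, h2, h3, ih]

-- ===== VERDICT (by name: the statement is the Claim_ definition above) =====
theorem content_summary_py_spec : Claim_equal_content_summary_py := by
  intro content _
  unfold Spec_content_summary_py content_summary_py content_summary_py_alt
  by_cases hc : content = ""
  · simp [hc]
  · simp only [hc, if_false]
    rw [pvBLoop_eq]
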